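-- pv_equiv track=rewrite | github.com/mnuman/aoc-2015 | src/day05.py | has_repeated_pair
-- ===== SOURCE A (Python) =====
-- def has_repeated_pair(s: str) -> bool:
--     pairs = {}
--     for i in range(len(s) - 1):
--         pair = s[i:i + 2]
--         if pair in pairs:
--             return True
--         pairs[pair] = i
--     return False
-- ===== SOURCE B (Python) =====
-- def has_repeated_pair(s: str) -> bool:
--     pairs = sorted(a + b for a, b in zip(s, s[1:]))
--     return any(x == y for x, y in zip(pairs, pairs[1:]))
-- ===== Notes on version B (the rewrite author's own statement) =====
-- stated objective: alternative
-- what changed: B detects a repeated adjacent pair by sorting the list of two-character substrings and scanning for two equal neighbours, instead of A's single indexed pass that tests and inserts each pair into a dict with an early return.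
import Mathlib
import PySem

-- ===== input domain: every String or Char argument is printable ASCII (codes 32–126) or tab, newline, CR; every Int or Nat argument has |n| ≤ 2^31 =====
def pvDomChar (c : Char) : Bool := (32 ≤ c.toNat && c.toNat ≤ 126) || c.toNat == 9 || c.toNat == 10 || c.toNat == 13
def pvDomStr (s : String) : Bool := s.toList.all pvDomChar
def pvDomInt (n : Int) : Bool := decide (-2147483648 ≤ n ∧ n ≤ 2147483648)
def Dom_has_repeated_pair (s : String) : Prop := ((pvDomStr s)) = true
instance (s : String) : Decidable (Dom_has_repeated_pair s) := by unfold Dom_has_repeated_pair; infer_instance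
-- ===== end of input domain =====

-- B replaces A's single dict-insert pass (early return on a hit) with sorting the list of
-- two-character substrings and scanning it once for two equal neighbours (alternative algorithm).

-- ===== PORT A =====
-- A's loop over i in range(len(s)-1): pair = s[i:i+2] (the two-char substring at i),
-- early-return True on a dict hit, else pairs[pair] = i. Dict keys are the two-char strings.
def hrpGoA : List Char → Int → PySem.Dict String Int → Bool
  | c1 :: c2 :: rest, i, pairs =>
      if pairs.contains (String.ofList [c1, c2]) then true
      else hrpGoA (c2 :: rest) (i + 1) (pairs.insert (String.ofList [c1, c2]) i)
  | _, _, _ => false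

def has_repeated_pair (s : String) : Bool :=
  hrpGoA s.toList 0 PySem.Dict.empty

-- ===== PORT B =====
-- Source B: pairs = sorted(a + b for a, b in zip(s, s[1:])); any(x == y for x, y in zip(pairs, pairs[1:]))
def has_repeated_pair_alt (s : String) : Bool :=
  let pairs := PySem.List.sorted
      ((s.toList.zip s.toList.tail).map fun p => String.ofList [p.1, p.2]) (fun x => x) false
  (pairs.zip pairs.tail).any fun q => q.1 == q.2

-- ===== PRECONDITION & SPEC =====
def Spec_has_repeated_pair (s : String) (out : Bool) : Prop := out = has_repeated_pair_alt s
instance (s : String) (out : Bool) : Decidable (Spec_has_repeated_pair s out) := by unfold Spec_has_repeated_pair; infer_instance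

-- ===== CLAIM (what is proved, stated in full; the proofs are below) =====
def Claim_equal_has_repeated_pair : Prop := ∀ (s : String), Dom_has_repeated_pair s → Spec_has_repeated_pair s (has_repeated_pair s)

-- ===== LEMMAS AND PROOFS =====

-- the pair-string list A's dict keys range over
def hrpPairs (l : List Char) : List String :=
  (l.zip l.tail).map fun p => String.ofList [p.1, p.2]

-- A's loop returns true iff some pair string is already a dict key or repeats in the list.
theorem hrpGoA_eq (l : List Char) (i : Int) (d : PySem.Dict String Int) :
    hrpGoA l i d = ((hrpPairs l).any (fun p => d.contains p) || !decide (hrpPairs l).Nodup) := by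
  induction l generalizing i d with
  | nil => simp [hrpGoA, hrpPairs]
  | cons c1 rest ih =>
    cases rest with
    | nil => simp [hrpGoA, hrpPairs]
    | cons c2 rest' =>
      by_cases h : d.contains (String.ofList [c1, c2])
      · simp [hrpGoA, hrpPairs, h]
      · rw [show hrpGoA (c1 :: c2 :: rest') i d
              = hrpGoA (c2 :: rest') (i + 1) (d.insert (String.ofList [c1, c2]) i) by
            simp [hrpGoA, h]]
        rw [ih]
        simp only [hrpPairs, List.zip_cons_cons, List.tail_cons, List.map_cons,
          List.any_cons, List.nodup_cons]
        have hc : ∀ p, (d.insert (String.ofList [c1, c2]) i).contains p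
            = (p == String.ofList [c1, c2] || d.contains p) :=
          fun p => PySem.Dict.contains_insert d (String.ofList [c1, c2]) p i
        simp only [hc, h]
        rcases Decidable.em (String.ofList [c1, c2]
            ∈ ((c2 :: rest').zip rest').map fun p => String.ofList [p.1, p.2]) with hm | hm
        · have ha : (((c2 :: rest').zip rest').map fun p => String.ofList [p.1, p.2]).any
              (fun p => p == String.ofList [c1, c2] || d.contains p) = true :=
            List.any_eq_true.mpr ⟨String.ofList [c1, c2], hm, by simp⟩
          simp [ha, hm]
        · have ha : (((c2 :: rest').zip rest').map fun p => String.ofList [p.1, p.2]).any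
              (fun p => p == String.ofList [c1, c2] || d.contains p)
              = (((c2 :: rest').zip rest').map fun p => String.ofList [p.1, p.2]).any
              (fun p => d.contains p) := by
            refine Bool.eq_iff_iff.mpr ?_
            simp only [List.any_eq_true, Bool.or_eq_true, beq_iff_eq]
            constructor
            · rintro ⟨p, hp, h1 | h2⟩
              · exact absurd (h1 ▸ hp) hm
              · exact ⟨p, hp, h2⟩
            · rintro ⟨p, hp, h2⟩
              exact ⟨p, hp, Or.inr h2⟩
          rw [ha]
          simp only [hm, not_false_iff, true_and, Bool.false_or]
          congr 1

-- a ≤-sorted list has two equal neighbours iff it has a duplicate at all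
theorem adjEq_eq_not_nodup {α : Type} [LinearOrder α] [BEq α] [LawfulBEq α] :
    ∀ (S : List α), S.Pairwise (· ≤ ·) →
      ((S.zip S.tail).any fun q => q.1 == q.2) = !decide S.Nodup
  | [], _ => by simp
  | [x], _ => by simp
  | x :: y :: t, h => by
    have hp := List.pairwise_cons.mp h
    by_cases hxe : x = y
    · subst hxe
      simp [List.nodup_cons]
    · have hlt : x < y := lt_of_le_of_ne (hp.1 y (by simp)) hxe
      have htail := List.pairwise_cons.mp hp.2
      have hnm : x ∉ y :: t := by
        intro hm
        rcases List.mem_cons.mp hm with h1 | h1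
        · exact hxe h1
        · exact absurd (htail.1 x h1) (not_le_of_gt hlt)
      have := adjEq_eq_not_nodup (y :: t) hp.2
      simp only [List.tail_cons, List.zip_cons_cons, List.any_cons, List.nodup_cons] at *
      simp [hxe, hnm, this]

-- ===== VERDICT (by name: the statement is the Claim_ definition above) =====
theorem has_repeated_pair_spec : Claim_equal_has_repeated_pair := by
  intro s _
  unfold Spec_has_repeated_pair has_repeated_pair has_repeated_pair_alt
  rw [hrpGoA_eq]
  have hce : ∀ p : String, (PySem.Dict.empty : PySem.Dict String Int).contains p = false :=
    fun _ => rfl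
  simp only [hce]
  rw [show (((hrpPairs s.toList).any fun _ => false) : Bool) = false by simp, Bool.false_or]
  rw [adjEq_eq_not_nodup _ (PySem.List.sorted_pairwise _ (fun x => x))]
  have hperm := PySem.List.sorted_perm
      ((s.toList.zip s.toList.tail).map fun p => String.ofList [p.1, p.2]) (fun x => x) false
  simp only [hrpPairs]
  exact (congrArg (fun b => !b) (decide_eq_decide.mpr hperm.nodup_iff)).symm
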